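-- pv_equiv track=rewrite | github.com/kvncn/SudokuHelper | sudoku_helper.py | get_conflict_cols
-- ===== SOURCE A (Python) =====
-- def get_conflict_cols(grid):
--     """
--     This function uses a for loop to iterate through every element
--     of every column of the grid array and check if there are any
--     duplicates, if there are, the column number will be appended to
--     a columns array and then this array will be returned.
--
--     Parameters:
--         grid -- array where each element is an array of any possible elements
--                 organized by columns.
--
--     Returns:
--         columns -- array of the columns where there are conflicts.
--
--     Pre-condition:
--         The grid array must exist and be passed into the function.
--
--     Post-condition:
--         The function will return an array of the number of the conflicting
--         columns.
--     """
--     columns = []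
--
--     #  The outer loop initializes an empty array and the dup variable to False.
--     #  The inner loop will then append numbers that were not seen before to the
--     #  array and if the number was seen and it is different than 0, dup will be
--     #  changed to True because there is a duplicate there. Then if duplicate
--     #  was changed to True, the column number will be appended to the columns
--     #  list.
--     for col in range(len(grid)):
--         seen = []
--         dup = False
--         for num in grid[col]:
--             if num not in seen:
--                 seen.append(num)
--             elif num in seen and num != 0:
--                 dup = True
--         if dup:
--             columns.append(col + 1)
--
--     return columns
-- ===== SOURCE B (Python) =====
-- def get_conflict_cols(grid):
--     columns = []
--     for col, row in enumerate(grid):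
--         nums = [n for n in row if n != 0]
--         if len(nums) != len(set(nums)):
--             columns.append(col + 1)
--     return columns
-- ===== Notes on version B (the rewrite author's own statement) =====
-- stated objective: faster
-- what changed: Replaces A's per-element seen-list membership scan and dup flag with a per-column cardinality test: collect the nonzero entries and compare their count with the count of their distinct values (set).
import Mathlib
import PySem

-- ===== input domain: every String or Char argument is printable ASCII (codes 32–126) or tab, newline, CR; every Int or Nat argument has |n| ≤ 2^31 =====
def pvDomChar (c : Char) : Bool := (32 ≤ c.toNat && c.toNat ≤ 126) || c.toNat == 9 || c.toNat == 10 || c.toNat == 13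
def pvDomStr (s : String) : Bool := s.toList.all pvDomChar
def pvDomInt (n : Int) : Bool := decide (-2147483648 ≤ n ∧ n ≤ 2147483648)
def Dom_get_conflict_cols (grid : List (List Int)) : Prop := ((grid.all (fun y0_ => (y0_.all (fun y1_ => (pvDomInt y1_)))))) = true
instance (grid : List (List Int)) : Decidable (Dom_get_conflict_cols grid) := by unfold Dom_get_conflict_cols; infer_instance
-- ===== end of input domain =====

-- B replaces A's per-element seen-list scan with dup flag by a per-column count-vs-distinct-count test; objective: simpler.

-- ===== PORT A =====
-- inner loop body of A: seen-list + dup flag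
def stepA (st : List Int × Bool) (num : Int) : List Int × Bool :=
  if !(st.1.contains num) then (st.1 ++ [num], st.2)
  else if st.1.contains num && num != 0 then (st.1, true)
  else st

-- A's inner 'for num in grid[col]' loop: final value of dup
def rowDupA (row : List Int) : Bool := (row.foldl stepA ([], false)).2

def get_conflict_cols (grid : List (List Int)) : List Int :=
  (PySem.List.pyRange 0 (grid.length : Int) 1).foldl (fun columns col =>
    if rowDupA (PySem.List.pyGetD grid col []) then columns ++ [col + 1] else columns) []

-- ===== PORT B =====
-- B's per-column test: len(nums) != len(set(nums)) for nums = nonzero entries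
def rowDupB (row : List Int) : Bool :=
  let nums := row.filter (fun n => n != 0)
  nums.length != (PySem.Set.ofList nums).length

def get_conflict_cols_alt (grid : List (List Int)) : List Int :=
  (PySem.List.enumerate grid).foldl (fun columns p =>
    if rowDupB p.2 then columns ++ [p.1 + 1] else columns) []

-- ===== PRECONDITION & SPEC =====
def Spec_get_conflict_cols (grid : List (List Int)) (out : List Int) : Prop := out = get_conflict_cols_alt grid
instance (grid : List (List Int)) (out : List Int) : Decidable (Spec_get_conflict_cols grid out) := by unfold Spec_get_conflict_cols; infer_instance

-- ===== CLAIM (what is proved, stated in full; the proofs are below) =====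
def Claim_equal_get_conflict_cols : Prop := ∀ (grid : List (List Int)), Dom_get_conflict_cols grid → Spec_get_conflict_cols grid (get_conflict_cols grid)

-- ===== LEMMAS AND PROOFS =====

-- A's inner loop invariant: the dup flag ends true iff a nonzero value occurs twice
-- among 'seen' (nonzero part) and the remaining input.
theorem innerA (l : List Int) : ∀ (seen : List Int) (dup : Bool), seen.Nodup →
    (l.foldl stepA (seen, dup)).2
      = (dup || !decide ((seen.filter (fun n => n != 0) ++ l.filter (fun n => n != 0)).Nodup)) := by
  induction l with
  | nil =>
    intro seen dup hnd
    simp [List.Nodup.filter _ hnd]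
  | cons num rest ih =>
    intro seen dup hnd
    simp only [List.foldl_cons, stepA]
    by_cases hmem : num ∈ seen
    · rw [if_neg (by simp [hmem])]
      by_cases h0 : num = 0
      · subst h0
        rw [if_neg (by simp)]
        rw [ih seen dup hnd]
        simp
      · rw [if_pos (by simp [hmem, h0])]
        rw [ih seen true hnd]
        have hno : ¬ ((seen.filter (fun n => n != 0) ++ (num :: rest).filter (fun n => n != 0)).Nodup) := by
          intro hnd2
          rw [List.nodup_append] at hnd2
          exact hnd2.2.2 num (List.mem_filter.2 ⟨hmem, by simp [h0]⟩) num
            (by simp [List.filter_cons, h0]) rfl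
        simp [hno]
    · rw [if_pos (by simp [hmem])]
      rw [ih (seen ++ [num]) dup
        (by simp [List.nodup_append, hnd]; exact fun a ha h => hmem (h ▸ ha))]
      by_cases h0 : num = 0
      · subst h0
        simp [List.filter_append]
      · simp [List.filter_append, h0]

-- set(xs) (first occurrences) is a sublist of xs
theorem foldl_add_split (xs : List Int) : ∀ (s : List Int),
    ∃ t, xs.foldl PySem.Set.add s = s ++ t ∧ t.Sublist xs := by
  induction xs with
  | nil => intro s; exact ⟨[], by simp⟩
  | cons x l ih =>
    intro s
    simp only [List.foldl_cons, PySem.Set.add]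
    by_cases hc : PySem.Set.contains s x
    · rw [if_pos hc]
      obtain ⟨t, ht, hs⟩ := ih s
      exact ⟨t, ht, hs.cons _⟩
    · rw [if_neg hc]
      obtain ⟨t, ht, hs⟩ := ih (s ++ [x])
      exact ⟨x :: t, by simpa using ht, hs.cons₂ _⟩

-- len(set(xs)) = len(xs) iff xs has no duplicates
theorem len_ofList_iff (xs : List Int) :
    ((PySem.Set.ofList xs).length = xs.length) ↔ xs.Nodup := by
  constructor
  · intro h
    obtain ⟨t, ht, hs⟩ := foldl_add_split xs []
    have heq : PySem.Set.ofList xs = t := by rw [PySem.Set.ofList_eq_foldl, ht]; simp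
    have hxs : t = xs := hs.eq_of_length (by rw [← heq, h])
    rw [← hxs, ← heq]
    exact PySem.Set.nodup_ofList xs
  · intro h
    rw [PySem.Set.ofList_eq_self_of_nodup xs h]

-- the two per-column tests agree
theorem rowDup_eq (row : List Int) : rowDupA row = rowDupB row := by
  rw [rowDupA, innerA row [] false List.nodup_nil]
  simp only [rowDupB, bne, List.filter_nil, List.nil_append, Bool.false_or]
  congr 1
  rw [Bool.beq_eq_decide_eq]
  rw [decide_eq_decide]
  exact (eq_comm.trans (len_ofList_iff _)).symm

-- xs[i] on a cons, for i ≥ 1, reads the tail at i-1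
theorem pyGetD_cons_shift {α : Type} (x : α) (xs : List α) (i : Int) (h : 1 ≤ i) (d : α) :
    PySem.List.pyGetD (x::xs) i d = PySem.List.pyGetD xs (i-1) d := by
  simp only [PySem.List.pyGetD, PySem.List.pyGet?, PySem.List.pyIdx?]
  rw [if_pos (by omega : (0:Int) ≤ i), if_pos (by omega : (0:Int) ≤ i - 1)]
  by_cases hlt : i < ((x::xs).length : Int)
  · rw [if_pos hlt, if_pos (by simp at hlt ⊢; omega)]
    have ht : i.toNat = (i-1).toNat + 1 := by omega
    rw [ht]; simp
  · rw [if_neg hlt, if_neg (by simp at hlt ⊢; omega)]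
    simp

-- index loop over range(s, s+len) with grid[c-s] equals loop over enumerate(grid, s)
theorem reindex (R : List Int → Bool) (g : List (List Int)) : ∀ (s : Int),
    (((PySem.List.pyRange s (s + g.length) 1).filter
        (fun c => R (PySem.List.pyGetD g (c - s) []))).map (fun c => c + 1))
    = (((PySem.List.enumerate g s).filter (fun q => R q.2)).map (fun q => q.1 + 1)) := by
  induction g with
  | nil => intro s; simp [PySem.List.pyRange_one_eq_nil, PySem.List.enumerate]
  | cons r rs ih =>
    intro s
    have h1 : s + ((r :: rs).length : Int) = (s + 1) + rs.length := by simp; omega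
    rw [h1, PySem.List.pyRange_one_cons (by omega), PySem.List.enumerate_cons]
    have h2 : (PySem.List.pyRange (s+1) (s + 1 + (rs.length:Int)) 1).filter
        (fun c => R (PySem.List.pyGetD (r :: rs) (c - s) []))
        = (PySem.List.pyRange (s+1) (s + 1 + (rs.length:Int)) 1).filter
        (fun c => R (PySem.List.pyGetD rs (c - (s+1)) [])) := by
      apply List.filter_congr
      intro c hc
      rw [PySem.List.mem_pyRange_one] at hc
      rw [pyGetD_cons_shift r rs (c - s) (by omega)]
      congr 2
      omega
    simp only [List.filter_cons, sub_self, PySem.List.pyGetD_zero_cons, h2]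
    by_cases hR : R r
    · simp only [hR, if_pos, List.map_cons]
      rw [ih (s+1)]
    · simp only [hR, Bool.false_eq_true, if_neg, not_false_iff]
      exact ih (s+1)

-- ===== VERDICT (by name: the statement is the Claim_ definition above) =====
theorem get_conflict_cols_spec : Claim_equal_get_conflict_cols := by
  intro grid _
  show get_conflict_cols grid = get_conflict_cols_alt grid
  rw [get_conflict_cols, get_conflict_cols_alt,
    PySem.List.foldl_append_if, PySem.List.foldl_append_if]
  simp only [List.nil_append]
  have hshape : (PySem.List.pyRange 0 ((grid.length:Int)) 1).filter
      (fun c => rowDupA (PySem.List.pyGetD grid c []))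
      = (PySem.List.pyRange 0 (0 + (grid.length:Int)) 1).filter
      (fun c => rowDupA (PySem.List.pyGetD grid (c - 0) [])) := by
    norm_num
  rw [hshape, reindex rowDupA grid 0]
  congr 1
  apply List.filter_congr
  intro q _
  rw [rowDup_eq]
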